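-- pv_equiv track=rewrite | github.com/moggieuk/Happy-Hare | extras/mmu/unit/selectors/mmu_indexed_selector.py | _best_rotation_direction
-- ===== SOURCE A (Python) =====
-- def _best_rotation_direction(start_gate, end_gate):
--     """
--     Choose rotation direction that reaches end_gate in the fewest steps.
--
--     Uses a fixed forward gate sequence and compares forward vs reverse step
--     counts from start_gate to end_gate.
--     """
--     if start_gate < 0:
--         return 1 # Forward direction
--
--     sequence = [0, 2, 1, 3] # Forward order of gates
--     n = len(sequence)
--     forward_distance = reverse_distance = 0
--
--     # Find distance in forward direction
--     start_idx = sequence.index(start_gate)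
--     for i in range(1, n):
--         if sequence[(start_idx + i) % n] == end_gate:
--             forward_distance = i
--             break
--
--     # Find distance in reverse direction
--     rev_seq = sequence[::-1]
--     start_idx = rev_seq.index(start_gate)
--     for i in range(1, n):
--         if rev_seq[(start_idx + i) % n] == end_gate:
--             reverse_distance = i
--             break
--
--     return 1 if forward_distance <= reverse_distance else -1
-- ===== SOURCE B (Python) =====
-- def _best_rotation_direction(start_gate, end_gate):
--     """Choose rotation direction via modular index arithmetic instead of scanning loops."""
--     if start_gate < 0:
--         return 1  # Forward direction
--     sequence = [0, 2, 1, 3]  # Forward order of gates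
--     n = len(sequence)
--     start_idx = sequence.index(start_gate)  # ValueError if start_gate not a known gate
--     if end_gate in sequence:
--         forward = (sequence.index(end_gate) - start_idx) % n
--     else:
--         forward = 0
--     return 1 if forward <= n - forward else -1
-- ===== Notes on version B (the rewrite author's own statement) =====
-- stated objective: simpler
-- what changed: Replaced the two scanning loops (forward and over the reversed sequence) by a single modular index subtraction: forward = (index(end)-index(start)) % 4, returning 1 iff forward <= 4 - forward.
import Mathlib
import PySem

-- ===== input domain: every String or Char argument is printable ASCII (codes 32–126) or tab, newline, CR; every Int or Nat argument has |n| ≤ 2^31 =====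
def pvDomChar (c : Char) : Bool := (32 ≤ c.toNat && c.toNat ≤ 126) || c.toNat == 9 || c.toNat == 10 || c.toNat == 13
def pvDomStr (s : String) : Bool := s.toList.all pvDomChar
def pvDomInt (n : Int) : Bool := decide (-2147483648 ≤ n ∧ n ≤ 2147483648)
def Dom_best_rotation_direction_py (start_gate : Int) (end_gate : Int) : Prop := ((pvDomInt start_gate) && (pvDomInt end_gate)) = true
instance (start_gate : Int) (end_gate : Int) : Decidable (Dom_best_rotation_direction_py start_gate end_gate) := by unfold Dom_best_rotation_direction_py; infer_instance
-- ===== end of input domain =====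

-- B replaces A's two scanning loops by one modular index subtraction (objective: simpler).

-- ===== PORT A =====
-- the 'for i in range(1, n): if seq[(start_idx+i) % n] == end_gate: dist = i; break' loop;
-- the index (start_idx+i) % 4 is always in range, so the getD default 0 is unreachable
def pvFindDist (seq : List Int) (start_idx : Int) (eg : Int) : List Int → Int
  | [] => 0
  | i :: rest =>
      if PySem.List.pyGetD seq (PySem.Int.mod (start_idx + i) 4) 0 = eg then i
      else pvFindDist seq start_idx eg rest

def best_rotation_direction_py (start_gate : Int) (end_gate : Int) : Int :=
  if start_gate < 0 then 1
  else
    let sequence : List Int := [0, 2, 1, 3]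
    -- sequence.index(start_gate): none = ValueError, excluded by Pre_
    let forward_distance :=
      match PySem.List.index? sequence start_gate with
      | none => 0
      | some si => pvFindDist sequence (si : Int) end_gate (PySem.List.pyRange 1 4 1)
    let rev_seq := sequence.reverse  -- sequence[::-1] (PySem.List.slice?_none_none_neg_one)
    let reverse_distance :=
      match PySem.List.index? rev_seq start_gate with
      | none => 0
      | some si => pvFindDist rev_seq (si : Int) end_gate (PySem.List.pyRange 1 4 1)
    if forward_distance ≤ reverse_distance then 1 else -1

-- ===== PORT B =====
def best_rotation_direction_py_alt (start_gate : Int) (end_gate : Int) : Int :=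
  if start_gate < 0 then 1
  else
    let sequence : List Int := [0, 2, 1, 3]
    match PySem.List.index? sequence start_gate with
    | none => 0  -- ValueError, excluded by Pre_
    | some si =>
        let forward : Int :=
          if end_gate ∈ sequence then
            match PySem.List.index? sequence end_gate with
            | none => 0
            | some ei => PySem.Int.mod ((ei : Int) - (si : Int)) 4
          else 0
        if forward ≤ 4 - forward then 1 else -1

-- ===== PRECONDITION & SPEC =====
-- excludes exactly the inputs where Python A raises ValueError: 0 ≤ start_gate not in [0,2,1,3]
def Pre_best_rotation_direction_py (start_gate : Int) (end_gate : Int) : Prop :=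
  start_gate < 0 ∨ start_gate = 0 ∨ start_gate = 1 ∨ start_gate = 2 ∨ start_gate = 3
instance (start_gate : Int) (end_gate : Int) : Decidable (Pre_best_rotation_direction_py start_gate end_gate) := by unfold Pre_best_rotation_direction_py; infer_instance
def pvWitness_best_rotation_direction_py : Int × Int := (2, 3)

def Spec_best_rotation_direction_py (start_gate : Int) (end_gate : Int) (out : Int) : Prop := out = best_rotation_direction_py_alt start_gate end_gate
instance (start_gate : Int) (end_gate : Int) (out : Int) : Decidable (Spec_best_rotation_direction_py start_gate end_gate out) := by unfold Spec_best_rotation_direction_py; infer_instance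

-- ===== CLAIM (what is proved, stated in full; the proofs are below) =====
def Claim_equal_best_rotation_direction_py : Prop := ∀ (start_gate : Int) (end_gate : Int), Dom_best_rotation_direction_py start_gate end_gate → Pre_best_rotation_direction_py start_gate end_gate → Spec_best_rotation_direction_py start_gate end_gate (best_rotation_direction_py start_gate end_gate)

-- ===== LEMMAS AND PROOFS =====

-- ===== VERDICT (by name: the statement is the Claim_ definition above) =====
theorem best_rotation_direction_py_spec : Claim_equal_best_rotation_direction_py := by
  intro sg eg _ hpre
  unfold Spec_best_rotation_direction_py best_rotation_direction_py best_rotation_direction_py_alt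
  rcases hpre with h | h | h | h | h
  · simp [h]
  all_goals subst h
  all_goals
    by_cases h0 : eg = 0 <;> by_cases h1 : eg = 1 <;> by_cases h2 : eg = 2 <;> by_cases h3 : eg = 3 <;>
      first
        | (subst_vars; decide)
        | simp [pvFindDist, PySem.List.pyRange, List.range_succ, List.idxOf?_cons,
                PySem.List.pyGetD, PySem.List.pyGet?, PySem.List.pyIdx?, Int.fmod, PySem.Int.mod,
                Ne.symm h0, Ne.symm h1, Ne.symm h2, Ne.symm h3]
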